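-- pv_equiv track=rewrite | github.com/alexeydemin/faang_tasks | interviewbit/mocks/toptal/first.py | solution
-- ===== SOURCE A (Python) =====
-- def solution(X, A):
--     x_count = A.count(X)
--     if x_count in [0, len(A)]:
--         return x_count
--
--     same_count = 0
--     diff_count = len(A) - x_count
--     index = 0
--
--     while same_count != diff_count and index != len(A) - 1:
--         if A[index] == X:
--             same_count += 1
--         else:
--             diff_count -= 1
--         index += 1
--
--     return index
-- ===== SOURCE B (Python) =====
-- def solution(X, A):
--     x_count = A.count(X)
--     if x_count == 0:
--         return 0
--     if x_count == len(A):
--         return len(A)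
--     # same_count == diff_count holds exactly when index == len(A) - x_count,
--     # which the loop always reaches first (it is <= len(A) - 1 here).
--     return len(A) - x_count
-- ===== Notes on version B (the rewrite author's own statement) =====
-- stated objective: simpler
-- what changed: Replaced the element-by-element while-loop with the closed form len(A) - A.count(X): the loop's stop condition same_count == diff_count holds exactly when index == len(A) - x_count, so the scan is dropped entirely.
import Mathlib
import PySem

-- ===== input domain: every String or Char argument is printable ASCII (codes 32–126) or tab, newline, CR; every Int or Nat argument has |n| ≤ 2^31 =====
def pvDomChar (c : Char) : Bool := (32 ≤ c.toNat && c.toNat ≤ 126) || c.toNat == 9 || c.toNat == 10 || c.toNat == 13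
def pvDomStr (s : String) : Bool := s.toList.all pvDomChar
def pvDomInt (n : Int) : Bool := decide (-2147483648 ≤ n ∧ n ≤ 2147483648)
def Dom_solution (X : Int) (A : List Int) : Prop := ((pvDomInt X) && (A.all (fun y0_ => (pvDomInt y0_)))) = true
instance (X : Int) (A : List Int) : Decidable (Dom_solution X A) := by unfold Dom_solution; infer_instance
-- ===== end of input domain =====

-- B replaces A's element-scanning while-loop by the closed form len(A) - count(X),
-- valid because the loop's stop condition holds exactly at that index (objective: simpler).


-- ===== PORT A =====
-- the while-loop, fuel-bounded (fuel = A.length suffices: the loop makes at most len(A)-1 steps)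
def solutionLoop (X : Int) (A : List Int) : Int → Int → Int → Nat → Int
  | _, _, index, 0 => index
  | same, diff, index, fuel+1 =>
    if same ≠ diff ∧ index ≠ (A.length : Int) - 1 then
      match PySem.List.pyGet? A index with
      | some v =>
        if v = X then solutionLoop X A (same + 1) diff (index + 1) fuel
        else solutionLoop X A same (diff - 1) (index + 1) fuel
      | none => index  -- IndexError; unreachable: index stays in range while the loop runs
    else index

def solution (X : Int) (A : List Int) : Int :=
  let x_count : Int := (PySem.List.count A X : Int)
  if x_count = 0 ∨ x_count = (A.length : Int) then x_count
  else solutionLoop X A 0 ((A.length : Int) - x_count) 0 A.length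

-- ===== PORT B =====
def solution_alt (X : Int) (A : List Int) : Int :=
  let x_count : Int := (PySem.List.count A X : Int)
  if x_count = 0 then 0
  else if x_count = (A.length : Int) then (A.length : Int)
  else (A.length : Int) - x_count

-- ===== PRECONDITION & SPEC =====
def Spec_solution (X : Int) (A : List Int) (out : Int) : Prop := out = solution_alt X A
instance (X : Int) (A : List Int) (out : Int) : Decidable (Spec_solution X A out) := by unfold Spec_solution; infer_instance

-- ===== CLAIM (what is proved, stated in full; the proofs are below) =====
def Claim_equal_solution : Prop := ∀ (X : Int) (A : List Int), Dom_solution X A → Spec_solution X A (solution X A)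

-- ===== LEMMAS AND PROOFS =====

-- Loop invariant: diff - same = target - index; the loop stops exactly at index = target.
theorem solutionLoop_eq_target (X : Int) (A : List Int) (target : Int)
    (htle : target ≤ (A.length : Int) - 1) :
    ∀ (fuel : Nat) (same diff index : Int),
      0 ≤ index → index ≤ target →
      diff - same = target - index →
      target - index ≤ (fuel : Int) →
      solutionLoop X A same diff index fuel = target := by
  intro fuel
  induction fuel with
  | zero =>
    intro same diff index _ hle hinv hfuel
    simp only [solutionLoop]
    omega
  | succ n ih =>
    intro same diff index h0 hle hinv hfuel
    by_cases heq : same = diff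
    · have : index = target := by omega
      simp [solutionLoop, heq, this]
    · have hlt : index < target := by omega
      have hidx : index < (A.length : Int) := by omega
      have hget : PySem.List.pyGet? A index = some (A[index.toNat]'(by omega)) := by
        rw [PySem.List.pyGet?_of_nonneg A h0]
        exact List.getElem?_eq_getElem (by omega)
      have hne : index ≠ (A.length : Int) - 1 := by omega
      simp only [solutionLoop, hget]
      rw [if_pos ⟨heq, hne⟩]
      by_cases hv : A[index.toNat]'(by omega) = X
      · rw [if_pos hv]; exact ih (same + 1) diff (index + 1) (by omega) (by omega) (by omega) (by omega)
      · rw [if_neg hv]; exact ih same (diff - 1) (index + 1) (by omega) (by omega) (by omega) (by omega)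

theorem solution_spec' (X : Int) (A : List Int) : solution X A = solution_alt X A := by
  unfold solution solution_alt
  simp only
  set c : Int := (PySem.List.count A X : Int) with hc
  have hcnn : 0 ≤ c := by positivity
  have hcle : c ≤ (A.length : Int) := by
    simp [hc, PySem.List.count]
    exact_mod_cast List.count_le_length
  by_cases h0 : c = 0
  · simp [h0]
  · by_cases hl : c = (A.length : Int)
    · simp [hl]
    · rw [if_neg (by tauto), if_neg h0, if_neg hl]
      exact solutionLoop_eq_target X A ((A.length : Int) - c) (by omega) A.length 0
        ((A.length : Int) - c) 0 le_rfl (by omega) (by omega) (by omega)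

-- ===== VERDICT (by name: the statement is the Claim_ definition above) =====
theorem solution_spec : Claim_equal_solution := by
  intro X A _
  exact solution_spec' X A
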